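-- pv_equiv track=rewrite | github.com/FRESH-TUNA/Algorithm | BFS/https:/www.acmicpc.net/problem/14502.py | solution
-- ===== SOURCE A (Python) =====
-- import sys, copy
-- from itertools import combinations, product
-- from collections import deque
--
-- def solution(N, M, g):
--     VS = find_viruss(N, M, g)
--     MAX_ANS = get_max_ans(N, M, g)
--     CASES = combinations(product(range(N), range(M)), 3)
--     ans = 0
--
--     for ((x1, y1), (x2, y2), (x3, y3)) in CASES:
--         if g[x1][y1] or g[x2][y2] or g[x3][y3]:
--             continue
--         g[x1][y1], g[x2][y2], g[x3][y3] = 1, 1, 1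
--         traced, new_ans = copy.deepcopy(g), MAX_ANS
--         for (vx, vy) in VS:
--             new_ans -= bfs(N, M, vx, vy, traced)
--             if new_ans <= ans: break
--         ans = max(ans, new_ans)
--         g[x1][y1], g[x2][y2], g[x3][y3] = 0, 0, 0
--     return ans
--
-- def bfs(N, M, x, y, traced):
--     Q, ans = deque(), 0
--     Q.append((x, y))
--
--     while Q:
--         x, y = Q.popleft()
--         nxys = ((x+1, y), (x-1, y), (x, y+1), (x, y-1))
--         for (nx, ny) in nxys:
--             if nx in (-1, N) or ny in (-1, M) or traced[nx][ny]:
--                 continue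
--             ans += 1
--             traced[nx][ny] = 1
--             Q.append((nx, ny))
--     return ans
--
-- def find_viruss(N, M, graph):
--     xys = []
--     for i in range(N):
--         for j in range(M):
--             if graph[i][j] == 2:
--                 xys.append((i, j))
--     return xys
--
-- def get_max_ans(N, M, graph):
--     ans = 0
--     for i in range(N):
--         for j in range(M):
--             if graph[i][j] == 0:
--                 ans += 1
--     return ans - 3
-- ===== SOURCE B (Python) =====
-- def solution(N, M, g):
--     cells = [(i, j) for i in range(N) for j in range(M)]
--     empties = [c for c in cells if g[c[0]][c[1]] == 0]
--     best = 0
--     r1 = empties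
--     while r1:
--         w1, r1 = r1[0], r1[1:]
--         r2 = r1
--         while r2:
--             w2, r2 = r2[0], r2[1:]
--             r3 = r2
--             while r3:
--                 w3, r3 = r3[0], r3[1:]
--                 walls = (w1, w2, w3)
--                 inf = {c for c in cells if g[c[0]][c[1]] == 2}
--                 while True:
--                     new = {c for c in cells
--                            if c in inf
--                            or (g[c[0]][c[1]] == 0 and c not in walls
--                                and any(d in inf for d in ((c[0] + 1, c[1]), (c[0] - 1, c[1]),
--                                                           (c[0], c[1] + 1), (c[0], c[1] - 1))))}
--                     if new == inf:
--                         break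
--                     inf = new
--                 best = max(best, sum(1 for e in empties
--                                      if e not in walls and e not in inf))
--     return best
-- ===== Notes on version B (the rewrite author's own statement) =====
-- stated objective: alternative
-- what changed: A enumerates itertools.combinations of ALL grid cells (skipping non-empty ones) and, per triple, deep-copies the mutated grid and runs one queue-based BFS per virus, subtracting each BFS's count from a precomputed total with an early break; B hand-rolls the triple choice as three nested suffix iterations over the empty cells only and computes the infection with a queue-free synchronous fixed-point label propagation (repeated full-grid sweeps of a set comprehension until the infected set stops changing), then counts the surviving safe cells directly.
import Mathlib
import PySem

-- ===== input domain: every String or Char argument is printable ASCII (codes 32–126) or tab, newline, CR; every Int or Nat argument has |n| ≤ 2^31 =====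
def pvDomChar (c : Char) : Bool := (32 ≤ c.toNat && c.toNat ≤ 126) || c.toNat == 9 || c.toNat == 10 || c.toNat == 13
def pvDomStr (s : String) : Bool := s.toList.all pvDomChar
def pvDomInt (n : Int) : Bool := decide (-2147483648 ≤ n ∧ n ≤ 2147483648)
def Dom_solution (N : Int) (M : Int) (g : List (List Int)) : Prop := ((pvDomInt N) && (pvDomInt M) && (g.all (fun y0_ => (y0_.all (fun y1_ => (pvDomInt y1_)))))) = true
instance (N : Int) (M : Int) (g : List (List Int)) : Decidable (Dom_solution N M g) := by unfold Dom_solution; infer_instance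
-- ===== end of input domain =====

-- B replaces A's combinations + per-virus BFS on a deep-copied, mutated grid by a hand-rolled
-- suffix iteration over the empty cells and a queue-free synchronous fixed-point label
-- propagation (full-grid sweeps until the infected set stops changing), counting the safe
-- cells directly (objective: alternative algorithm; return value only — A temporarily
-- mutates g but always restores it before returning).

-- ===== PORT A =====
-- Positions are (row, col) : Int × Int.  Every grid index the Python actually evaluates is
-- nonnegative, so getD-style access is exact wherever the Python returns a value;
-- out-of-range access raises IndexError in Python and is excluded by Pre_solution.
def pvRow (g : List (List Int)) (x : Int) : List Int :=
  if 0 ≤ x then g.getD x.toNat [] else []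

def pvAt (g : List (List Int)) (x y : Int) : Int :=
  if 0 ≤ y then (pvRow g x).getD y.toNat 0 else 0

def pvInGrid (g : List (List Int)) (x y : Int) : Bool :=
  decide (0 ≤ x ∧ x < (g.length : Int) ∧ 0 ≤ y ∧ y < ((pvRow g x).length : Int))

def pvSet (g : List (List Int)) (x y v : Int) : List (List Int) :=
  if 0 ≤ x ∧ 0 ≤ y then g.set x.toNat ((pvRow g x).set y.toNat v) else g

def pvNbrs (x y : Int) : List (Int × Int) := [(x+1, y), (x-1, y), (x, y+1), (x, y-1)]

def pvOpenCount (t : List (List Int)) : Nat := (t.map (fun r => r.count 0)).sum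

-- the inner 'for (nx, ny) in nxys' loop of A's bfs; the 'pvInGrid … = false' disjunct is a
-- totality guard that fires only where the Python raises IndexError (outside Pre_solution)
def pvScan (N M : Int) : List (Int × Int) → List (List Int) → Int → List (Int × Int) →
    List (List Int) × Int × List (Int × Int)
  | [], t, a, app => (t, a, app)
  | c :: rest, t, a, app =>
    if c.1 = -1 ∨ c.1 = N ∨ c.2 = -1 ∨ c.2 = M ∨ pvInGrid t c.1 c.2 = false ∨ pvAt t c.1 c.2 ≠ 0 then
      pvScan N M rest t a app
    else
      pvScan N M rest (pvSet t c.1 c.2 1) (a + 1) (app ++ [c])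

-- termination helper for pvBfsLoop: each cell appended by pvScan turns exactly one 0 into a 1
lemma pvCount_set_zero (r : List Int) (n : Nat) (h : r[n]? = some 0) :
    (r.set n 1).count 0 + 1 = r.count 0 := by
  induction r generalizing n with
  | nil => simp at h
  | cons a r ih =>
    cases n with
    | zero => simp_all [List.count_cons]
    | succ n =>
      simp only [List.getElem?_cons_succ] at h
      have hstep : (a :: r).set (n + 1) 1 = a :: r.set n 1 := rfl
      rw [hstep, List.count_cons, List.count_cons]
      have := ih n h
      omega

lemma pvSum_set (l : List Nat) (i : Nat) (v : Nat) (h : i < l.length) :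
    (l.set i v).sum + l[i] = l.sum + v := by
  induction l generalizing i with
  | nil => simp at h
  | cons a l ih =>
    cases i with
    | zero => simp [List.set_cons_zero]; omega
    | succ i =>
      have hi : i < l.length := by simpa using h
      have hstep : (a :: l).set (i + 1) v = a :: l.set i v := rfl
      rw [hstep]
      simp only [List.sum_cons, List.getElem_cons_succ]
      have := ih i hi
      omega

lemma pvOpenCount_set (t : List (List Int)) (x y : Int)
    (h : pvInGrid t x y = true) (hz : pvAt t x y = 0) :
    pvOpenCount (pvSet t x y 1) + 1 = pvOpenCount t := by
  simp only [pvInGrid, decide_eq_true_eq] at h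
  obtain ⟨hx0, hxl, hy0, hyl⟩ := h
  have hx : x.toNat < t.length := by omega
  have hrow : pvRow t x = t[x.toNat] := by
    simp [pvRow, hx0, List.getD_eq_getElem?_getD, List.getElem?_eq_getElem hx]
  have hy : y.toNat < (t[x.toNat] : List Int).length := by
    rw [hrow] at hyl; omega
  have hz' : (t[x.toNat] : List Int)[y.toNat]? = some 0 := by
    have h1 : pvAt t x y = (t[x.toNat] : List Int).getD y.toNat 0 := by
      simp [pvAt, hy0, hrow]
    rw [hz] at h1
    rw [List.getElem?_eq_getElem hy]
    have h2 := h1.symm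
    rw [List.getD_eq_getElem?_getD, List.getElem?_eq_getElem hy] at h2
    simpa using h2
  have hset : pvSet t x y 1 = t.set x.toNat ((t[x.toNat] : List Int).set y.toNat 1) := by
    simp [pvSet, hx0, hy0, hrow]
  rw [hset]
  unfold pvOpenCount
  rw [List.map_set]
  have hcnt := pvCount_set_zero (t[x.toNat]) y.toNat hz'
  have hmem : x.toNat < (t.map (fun r => r.count 0)).length := by simpa using hx
  have hsum := pvSum_set (t.map (fun r => r.count 0)) x.toNat
      (List.count 0 ((t[x.toNat] : List Int).set y.toNat 1)) hmem
  rw [List.getElem_map] at hsum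
  omega

lemma pvScan_meas (N M : Int) : ∀ (ns : List (Int × Int)) (t : List (List Int)) (a : Int)
    (app : List (Int × Int)),
    pvOpenCount (pvScan N M ns t a app).1 + (pvScan N M ns t a app).2.2.length =
      pvOpenCount t + app.length := by
  intro ns
  induction ns with
  | nil => intro t a app; simp [pvScan]
  | cons c rest ih =>
    intro t a app
    rw [pvScan]
    split
    · exact ih t a app
    · rename_i hguard
      push_neg at hguard
      have hin : pvInGrid t c.1 c.2 = true := by
        rcases hguard with ⟨_, _, _, _, h5, _⟩
        simpa using h5
      have hz : pvAt t c.1 c.2 = 0 := by tauto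
      have := pvOpenCount_set t c.1 c.2 hin hz
      have h2 := ih (pvSet t c.1 c.2 1) (a + 1) (app ++ [c])
      simp only [List.length_append, List.length_cons, List.length_nil] at h2 ⊢
      omega

-- A's bfs while-loop: pop from the front, scan the four neighbours, append fresh cells
def pvBfsLoop (N M : Int) : List (Int × Int) → List (List Int) → Int → List (List Int) × Int
  | [], t, a => (t, a)
  | q :: Q, t, a =>
    let r := pvScan N M (pvNbrs q.1 q.2) t a []
    pvBfsLoop N M (Q ++ r.2.2) r.1 r.2.1
termination_by Q t _ => pvOpenCount t + Q.length
decreasing_by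
  have h := pvScan_meas N M (pvNbrs q.1 q.2) t a []
  simp only [List.length_append, List.length_cons, List.length_nil] at h ⊢
  omega

def pvBfs (N M x y : Int) (t : List (List Int)) : List (List Int) × Int :=
  pvBfsLoop N M [(x, y)] t 0

-- A's 'for (vx, vy) in VS' loop with the early break
def pvInner (N M ans : Int) : List (Int × Int) → List (List Int) → Int → Int
  | [], _, newAns => newAns
  | v :: vs, t, newAns =>
    let r := pvBfs N M v.1 v.2 t
    if newAns - r.2 ≤ ans then newAns - r.2 else pvInner N M ans vs r.1 (newAns - r.2)

def pvFindViruss (N M : Int) (g : List (List Int)) : List (Int × Int) :=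
  (PySem.List.pyRange 0 N).foldl (fun xys i =>
    (PySem.List.pyRange 0 M).foldl (fun xys j =>
      if pvAt g i j = 2 then xys ++ [(i, j)] else xys) xys) []

def pvGetMaxAns (N M : Int) (g : List (List Int)) : Int :=
  ((PySem.List.pyRange 0 N).foldl (fun a i =>
    (PySem.List.pyRange 0 M).foldl (fun a j =>
      if pvAt g i j = 0 then a + 1 else a) a) 0) - 3

-- itertools.product(range(N), range(M))
def pvProduct (N M : Int) : List (Int × Int) :=
  (PySem.List.pyRange 0 N) ×ˢ (PySem.List.pyRange 0 M)

def solution (N : Int) (M : Int) (g : List (List Int)) : Int :=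
  let VS := pvFindViruss N M g
  let MAXA := pvGetMaxAns N M g
  (PySem.List.combinations (pvProduct N M) 3).foldl (fun ans c =>
    match c with
    | [p1, p2, p3] =>
      if pvAt g p1.1 p1.2 ≠ 0 ∨ pvAt g p2.1 p2.2 ≠ 0 ∨ pvAt g p3.1 p3.2 ≠ 0 then ans
      else
        let g' := pvSet (pvSet (pvSet g p1.1 p1.2 1) p2.1 p2.2 1) p3.1 p3.2 1
        max ans (pvInner N M ans VS g' MAXA)
    | _ => ans) 0

-- ===== PORT B =====
-- one synchronous propagation sweep: B's set comprehension over all cells (a PySem.Set,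
-- kept as the canonical distinct sublist of the nodup cells list)
def pvSweep (g : List (List Int)) (w : List (Int × Int)) (cells inf : List (Int × Int)) :
    List (Int × Int) :=
  cells.filter (fun c => decide (c ∈ inf) ||
    (decide (pvAt g c.1 c.2 = 0) && decide (c ∉ w) &&
      (pvNbrs c.1 c.2).any (fun d => decide (d ∈ inf))))

-- B's 'while True' propagation loop; the Nat argument is ONLY a totality guard (fuel):
-- the infected set strictly grows on every non-final sweep, so starting from a distinct
-- sublist of cells the loop stabilizes within cells.length + 1 sweeps (proved below) and
-- the fuel-0 branch is never taken on the calls solution_alt makes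
def pvPropagate (g : List (List Int)) (w : List (Int × Int)) (cells : List (Int × Int)) :
    Nat → List (Int × Int) → List (Int × Int)
  | 0, inf => inf
  | k + 1, inf =>
    let new := pvSweep g w cells inf
    if new.all (fun c => decide (c ∈ inf)) && inf.all (fun c => decide (c ∈ new)) then inf
    else pvPropagate g w cells k new

-- the body of B's innermost loop: infect by fixed-point propagation, then count the
-- still-safe empty cells directly
def pvEval (g : List (List Int)) (cells empties : List (Int × Int)) (w1 w2 w3 : Int × Int) : Int :=
  let inf0 := cells.filter (fun c => decide (pvAt g c.1 c.2 = 2))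
  let inf := pvPropagate g [w1, w2, w3] cells (cells.length + 1) inf0
  ((empties.filter (fun e =>
      decide (e ∉ ([w1, w2, w3] : List (Int × Int))) && decide (e ∉ inf))).length : Int)

-- B's three hand-rolled suffix loops ('while r: w, r = r[0], r[1:]')
def pvLoop3 (g : List (List Int)) (cells empties : List (Int × Int)) (w1 w2 : Int × Int) :
    List (Int × Int) → Int → Int
  | [], best => best
  | w3 :: r3, best => pvLoop3 g cells empties w1 w2 r3 (max best (pvEval g cells empties w1 w2 w3))

def pvLoop2 (g : List (List Int)) (cells empties : List (Int × Int)) (w1 : Int × Int) :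
    List (Int × Int) → Int → Int
  | [], best => best
  | w2 :: r2, best => pvLoop2 g cells empties w1 r2 (pvLoop3 g cells empties w1 w2 r2 best)

def pvLoop1 (g : List (List Int)) (cells empties : List (Int × Int)) :
    List (Int × Int) → Int → Int
  | [], best => best
  | w1 :: r1, best => pvLoop1 g cells empties r1 (pvLoop2 g cells empties w1 r1 best)

def solution_alt (N : Int) (M : Int) (g : List (List Int)) : Int :=
  let cells := pvProduct N M
  let empties := cells.filter (fun c => decide (pvAt g c.1 c.2 = 0))
  pvLoop1 g cells empties empties 0

-- ===== PRECONDITION & SPEC =====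
-- Pre_solution: exactly the inputs where Python A returns normally — with a nonempty window
-- (N, M > 0) the grid must have at least N rows whose first N rows are at least M wide;
-- otherwise A raises IndexError.
def Pre_solution (N : Int) (M : Int) (g : List (List Int)) : Prop :=
  0 < N → 0 < M → N ≤ (g.length : Int) ∧ ∀ r ∈ g.take N.toNat, M ≤ (r.length : Int)
instance (N : Int) (M : Int) (g : List (List Int)) : Decidable (Pre_solution N M g) := by
  unfold Pre_solution; infer_instance

def pvWitness_solution : Int × Int × List (List Int) := (2, 2, [[2, 0], [0, 0]])

def Spec_solution (N : Int) (M : Int) (g : List (List Int)) (out : Int) : Prop := out = solution_alt N M g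
instance (N : Int) (M : Int) (g : List (List Int)) (out : Int) : Decidable (Spec_solution N M g out) := by unfold Spec_solution; infer_instance

-- ===== CLAIM (what is proved, stated in full; the proofs are below) =====
def Claim_equal_solution : Prop := ∀ (N : Int) (M : Int) (g : List (List Int)), Dom_solution N M g → Pre_solution N M g → Spec_solution N M g (solution N M g)

-- ===== LEMMAS AND PROOFS =====

-- ---------- abstract reachability layer ----------
abbrev pvWin (N M : Int) (c : Int × Int) : Prop := 0 ≤ c.1 ∧ c.1 < N ∧ 0 ≤ c.2 ∧ c.2 < M

abbrev pvOW (N M : Int) (g : List (List Int)) (w : List (Int × Int)) (c : Int × Int) : Prop :=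
  pvWin N M c ∧ pvAt g c.1 c.2 = 0 ∧ c ∉ w

def pvAdj (p q : Int × Int) : Prop := q ∈ pvNbrs p.1 p.2

inductive pvReach (O src : Int × Int → Prop) : Int × Int → Prop
  | base {x y : Int × Int} : src x → pvAdj x y → O y → pvReach O src y
  | step {x y : Int × Int} : pvReach O src x → pvAdj x y → O y → pvReach O src y

def pvCtx (N M : Int) (g : List (List Int)) (w : List (Int × Int)) : Prop :=
  (N ≤ (g.length : Int) ∧ ∀ r ∈ g.take N.toNat, M ≤ (r.length : Int)) ∧
  (∀ p ∈ w, pvWin N M p ∧ pvAt g p.1 p.2 = 0)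

def pvWalled (g : List (List Int)) (w : List (Int × Int)) : List (List Int) :=
  w.foldl (fun t p => pvSet t p.1 p.2 1) g

def pvInv (N M : Int) (g : List (List Int)) (w : List (Int × Int))
    (t : List (List Int)) (S : Finset (Int × Int)) : Prop :=
  t.map List.length = g.map List.length ∧
  (∀ c, c ∈ S → pvOW N M g w c) ∧
  (∀ c : Int × Int, pvAt t c.1 c.2 = if c ∈ S then 1 else pvAt (pvWalled g w) c.1 c.2)

lemma pvReach_mono {O O' src src' : Int × Int → Prop} (hO : ∀ c, O c → O' c)
    (hs : ∀ c, src c → src' c) : ∀ c, pvReach O src c → pvReach O' src' c := by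
  intro c h
  induction h with
  | base hx hadj hOy => exact pvReach.base (hs _ hx) hadj (hO _ hOy)
  | step _ hadj hOy ih => exact pvReach.step ih hadj (hO _ hOy)

lemma pvReach_congr {O O' src src' : Int × Int → Prop} (hO : ∀ c, O c ↔ O' c)
    (hs : ∀ c, src c ↔ src' c) (c : Int × Int) : pvReach O src c ↔ pvReach O' src' c :=
  ⟨pvReach_mono (fun c h => (hO c).mp h) (fun c h => (hs c).mp h) c,
   pvReach_mono (fun c h => (hO c).mpr h) (fun c h => (hs c).mpr h) c⟩

lemma pvReach_src_empty {O src : Int × Int → Prop} (h : ∀ x, ¬ src x) (c : Int × Int) :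
    ¬ pvReach O src c := by
  intro hr
  induction hr with
  | base hx _ _ => exact h _ hx
  | step _ _ _ ih => exact ih

lemma pvReach_open {O src : Int × Int → Prop} {c : Int × Int} (h : pvReach O src c) : O c := by
  cases h with
  | base _ _ hO => exact hO
  | step _ _ hO => exact hO

-- the one-step commutation of A's worklist: expanding a source x through its fresh open
-- neighbours F does not change the reachable set
lemma pvCrux {O O' src src' : Int × Int → Prop} {x : Int × Int} {F : List (Int × Int)}
    (hsx : src x)
    (hF1 : ∀ c ∈ F, O c ∧ pvAdj x c)
    (hF2 : ∀ c, pvAdj x c → O c → c ∈ F)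
    (hO' : ∀ c, O' c ↔ O c ∧ c ∉ F)
    (hs1 : ∀ y, src' y → src y)
    (hs2 : ∀ y, src y → src' y ∨ y = x) :
    ∀ c, pvReach O src c ↔ (c ∈ F ∨ pvReach O' (fun y => src' y ∨ y ∈ F) c) := by
  intro c
  constructor
  · intro h
    induction h with
    | @base x0 y0 hs hadj hO =>
      by_cases hyF : y0 ∈ F
      · exact Or.inl hyF
      · rcases hs2 _ hs with hs' | rfl
        · exact Or.inr (pvReach.base (Or.inl hs') hadj ((hO' y0).mpr ⟨hO, hyF⟩))
        · exact absurd (hF2 _ hadj hO) hyF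
    | @step x0 y0 hr hadj hO ih =>
      by_cases hyF : y0 ∈ F
      · exact Or.inl hyF
      · have hO'y : O' y0 := (hO' y0).mpr ⟨hO, hyF⟩
        rcases ih with hxF | hr'
        · exact Or.inr (pvReach.base (Or.inr hxF) hadj hO'y)
        · exact Or.inr (pvReach.step hr' hadj hO'y)
  · intro h
    have hFreach : ∀ d ∈ F, pvReach O src d := fun d hd =>
      pvReach.base hsx (hF1 d hd).2 (hF1 d hd).1
    rcases h with hF | hr
    · exact hFreach _ hF
    · induction hr with
      | @base x0 y0 hs hadj hO =>
        have hOy : O y0 := ((hO' y0).mp hO).1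
        rcases hs with hs' | hxF
        · exact pvReach.base (hs1 _ hs') hadj hOy
        · exact pvReach.step (hFreach _ hxF) hadj hOy
      | @step x0 y0 hr0 hadj hO ih =>
        exact pvReach.step ih hadj ((hO' y0).mp hO).1

-- sequential flood fills from v then from vs compute the flood fill from v :: vs
lemma pvSeqComp {P : Int × Int → Prop} {S S1 : Finset (Int × Int)} {v : Int × Int}
    {vs : List (Int × Int)}
    (hS1 : ∀ c, c ∈ S1 ↔ c ∈ S ∨ pvReach (fun c => P c ∧ c ∉ S) (· ∈ ([v] : List (Int × Int))) c) :
    ∀ c, (c ∈ S1 ∨ pvReach (fun c => P c ∧ c ∉ S1) (· ∈ vs) c) ↔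
         (c ∈ S ∨ pvReach (fun c => P c ∧ c ∉ S) (· ∈ v :: vs) c) := by
  have hSsub : ∀ c : Int × Int, c ∈ S → c ∈ S1 := fun c hc => (hS1 c).mpr (Or.inl hc)
  intro c
  constructor
  · rintro (hc1 | hr)
    · rcases (hS1 c).mp hc1 with h | h
      · exact Or.inl h
      · exact Or.inr (pvReach_mono (fun d hd => hd)
          (fun d hd => by simpa using Or.inl (by simpa using hd)) c h)
    · refine Or.inr (pvReach_mono (fun d hd => ⟨hd.1, fun hdS => hd.2 (hSsub d hdS)⟩)
        (fun d hd => List.mem_cons_of_mem v hd) c hr)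
  · rintro (hcS | hr)
    · exact Or.inl (hSsub c hcS)
    · induction hr with
      | @base x0 y0 hs hadj hO =>
        by_cases hy1 : y0 ∈ S1
        · exact Or.inl hy1
        · have hy2 : y0 ∉ S ∧ ¬ pvReach (fun c => P c ∧ c ∉ S) (· ∈ ([v] : List (Int × Int))) y0 := by
            have := (hS1 y0).mp
            constructor
            · exact fun h => hy1 ((hS1 y0).mpr (Or.inl h))
            · exact fun h => hy1 ((hS1 y0).mpr (Or.inr h))
          rcases List.mem_cons.mp hs with rfl | hvs
          · exact absurd (pvReach.base (List.mem_singleton_self x0) hadj hO) hy2.2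
          · exact Or.inr (pvReach.base hvs hadj ⟨hO.1, hy1⟩)
      | @step x0 y0 hr0 hadj hO ih =>
        by_cases hy1 : y0 ∈ S1
        · exact Or.inl hy1
        · rcases ih with hx1 | hrx
          · rcases (hS1 x0).mp hx1 with hxS | hxR
            · exact absurd hxS (pvReach_open hr0).2
            · have : pvReach (fun c => P c ∧ c ∉ S) (· ∈ ([v] : List (Int × Int))) y0 :=
                pvReach.step hxR hadj hO
              exact absurd ((hS1 y0).mpr (Or.inr this)) hy1
          · exact Or.inr (pvReach.step hrx hadj ⟨hO.1, hy1⟩)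

-- ---------- grid lemmas ----------
lemma pvGetD_length (t : List (List Int)) (i : Nat) :
    (t.getD i []).length = (t.map List.length).getD i 0 := by
  induction t generalizing i with
  | nil => simp
  | cons r t ih =>
    cases i with
    | zero => simp
    | succ i => simpa using ih i

lemma pvRow_length_congr {t g : List (List Int)} (h : t.map List.length = g.map List.length)
    (x : Int) : (pvRow t x).length = (pvRow g x).length := by
  unfold pvRow
  by_cases hx : 0 ≤ x
  · simp only [hx, if_true]
    rw [pvGetD_length, pvGetD_length, h]
  · simp [hx]

lemma pvInGrid_congr {t g : List (List Int)} (h : t.map List.length = g.map List.length)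
    (x y : Int) : pvInGrid t x y = pvInGrid g x y := by
  have h1 : t.length = g.length := by
    have := congrArg List.length h; simpa using this
  have h2 := pvRow_length_congr h x
  simp only [pvInGrid, h1, h2]

lemma pvRow_eq_getElem {t : List (List Int)} {x : Int} (hx0 : 0 ≤ x)
    (hi : x.toNat < t.length) : pvRow t x = t[x.toNat] := by
  rw [pvRow, if_pos hx0, List.getD_eq_getElem?_getD, List.getElem?_eq_getElem hi,
    Option.getD_some]

lemma pvSet_map_length (t : List (List Int)) (x y v : Int) :
    (pvSet t x y v).map List.length = t.map List.length := by
  by_cases hxy : 0 ≤ x ∧ 0 ≤ y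
  · rw [show pvSet t x y v = t.set x.toNat ((pvRow t x).set y.toNat v) from by
      rw [pvSet, if_pos hxy]]
    rw [List.map_set]
    by_cases hi : x.toNat < t.length
    · have hml : x.toNat < (t.map List.length).length := by simpa using hi
      have hrowlen : ((pvRow t x).set y.toNat v).length = (t.map List.length)[x.toNat] := by
        rw [List.length_set, List.getElem_map, pvRow_eq_getElem hxy.1 hi]
      rw [hrowlen]
      exact List.set_getElem_self hml
    · exact List.set_eq_of_length_le (by simpa using Nat.le_of_not_lt hi)
  · rw [pvSet, if_neg hxy]

lemma pvGetD_set {α : Type} (l : List α) (n m : Nat) (a d : α) :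
    (l.set n a).getD m d = if n = m ∧ n < l.length then a else l.getD m d := by
  rw [List.getD_eq_getElem?_getD, List.getD_eq_getElem?_getD, List.getElem?_set]
  by_cases hnm : n = m
  · subst hnm
    by_cases hl : n < l.length
    · rw [if_pos rfl, if_pos hl, if_pos ⟨rfl, hl⟩]; rfl
    · rw [if_pos rfl, if_neg hl, if_neg (fun h => hl h.2),
        List.getElem?_eq_none (Nat.le_of_not_lt hl)]
  · rw [if_neg hnm, if_neg (fun h => hnm h.1)]

lemma pvAt_pvSet {t : List (List Int)} {x y : Int} (hin : pvInGrid t x y = true) (v : Int) :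
    ∀ a b : Int, pvAt (pvSet t x y v) a b = if a = x ∧ b = y then v else pvAt t a b := by
  simp only [pvInGrid, decide_eq_true_eq] at hin
  obtain ⟨hx0, hxl, hy0, hyl⟩ := hin
  have hx : x.toNat < t.length := by omega
  have hrow : pvRow t x = t[x.toNat] := pvRow_eq_getElem hx0 hx
  have hy : y.toNat < (t[x.toNat] : List Int).length := by rw [hrow] at hyl; omega
  have hset : pvSet t x y v = t.set x.toNat ((t[x.toNat] : List Int).set y.toNat v) := by
    rw [pvSet, if_pos ⟨hx0, hy0⟩, hrow]
  intro a b
  rw [hset]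
  by_cases hb0 : 0 ≤ b
  · by_cases ha0 : 0 ≤ a
    · have hrowset : pvRow (t.set x.toNat ((t[x.toNat] : List Int).set y.toNat v)) a
          = if x.toNat = a.toNat ∧ x.toNat < t.length then
              (t[x.toNat] : List Int).set y.toNat v
            else pvRow t a := by
        simp only [pvRow, ha0, if_true]
        exact pvGetD_set t x.toNat a.toNat _ []
      by_cases hax : a = x
      · subst hax
        rw [pvAt, if_pos hb0, hrowset, if_pos ⟨by omega, hx⟩, pvGetD_set]
        by_cases hby : b = y
        · subst hby
          rw [if_pos ⟨by omega, hy⟩, if_pos ⟨rfl, rfl⟩]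
        · have hby' : ¬ (y.toNat = b.toNat ∧ y.toNat < (t[a.toNat] : List Int).length) := by
            rintro ⟨hh, _⟩; exact hby (by omega)
          rw [if_neg hby', if_neg (by rintro ⟨_, rfl⟩; exact hby rfl)]
          have hrow' : pvRow t a = t[a.toNat] := pvRow_eq_getElem ha0 hx
          rw [pvAt, if_pos hb0, hrow']
      · have hax' : ¬ (x.toNat = a.toNat ∧ x.toNat < t.length) := by
          rintro ⟨hh, _⟩; exact hax (by omega)
        rw [pvAt, if_pos hb0, hrowset, if_neg hax',
          if_neg (by rintro ⟨rfl, _⟩; exact hax rfl), pvAt, if_pos hb0]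
    · have hne : ¬ (a = x ∧ b = y) := by rintro ⟨rfl, rfl⟩; omega
      simp [pvAt, pvRow, ha0, hne]
  · have hne : ¬ (a = x ∧ b = y) := by rintro ⟨rfl, rfl⟩; omega
    simp [pvAt, hb0, hne]

lemma pvCtx_win_inGrid {N M : Int} {g : List (List Int)} {w : List (Int × Int)}
    (ctx : pvCtx N M g w) {c : Int × Int} (hc : pvWin N M c) :
    pvInGrid g c.1 c.2 = true := by
  obtain ⟨⟨hNl, hrows⟩, _⟩ := ctx
  obtain ⟨h1, h2, h3, h4⟩ := hc
  have hx : c.1.toNat < g.length := by omega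
  have hrow : pvRow g c.1 = g[c.1.toNat] := pvRow_eq_getElem h1 hx
  have hmem : g[c.1.toNat] ∈ g.take N.toNat := by
    have hlt : c.1.toNat < N.toNat := by omega
    have hlt2 : c.1.toNat < (g.take N.toNat).length := by
      simp [List.length_take]; omega
    have : (g.take N.toNat)[c.1.toNat] = g[c.1.toNat] := List.getElem_take
    rw [← this]
    exact List.getElem_mem hlt2
  have hM := hrows _ hmem
  simp only [pvInGrid, decide_eq_true_eq]
  refine ⟨h1, by omega, h3, ?_⟩
  rw [hrow]; omega

lemma pvWalled_map_length (g : List (List Int)) (w : List (Int × Int)) :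
    (pvWalled g w).map List.length = g.map List.length := by
  induction w generalizing g with
  | nil => rfl
  | cons p w ih =>
    show (pvWalled (pvSet g p.1 p.2 1) w).map List.length = _
    rw [ih, pvSet_map_length]

lemma pvAt_foldl_set : ∀ (w : List (Int × Int)) (t : List (List Int)),
    (∀ p ∈ w, pvInGrid t p.1 p.2 = true) →
    ∀ c : Int × Int, pvAt (w.foldl (fun t p => pvSet t p.1 p.2 1) t) c.1 c.2 =
      if c ∈ w then 1 else pvAt t c.1 c.2 := by
  intro w
  induction w with
  | nil => intro t _ c; simp
  | cons p w ih =>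
    intro t hin c
    have hp : pvInGrid t p.1 p.2 = true := hin p (List.mem_cons_self)
    have hin' : ∀ q ∈ w, pvInGrid (pvSet t p.1 p.2 1) q.1 q.2 = true := by
      intro q hq
      rw [pvInGrid_congr (pvSet_map_length t p.1 p.2 1)]
      exact hin q (List.mem_cons_of_mem p hq)
    have := ih (pvSet t p.1 p.2 1) hin' c
    show pvAt (w.foldl (fun t p => pvSet t p.1 p.2 1) (pvSet t p.1 p.2 1)) c.1 c.2 = _
    rw [this, pvAt_pvSet hp 1 c.1 c.2]
    by_cases hcw : c ∈ w
    · simp [hcw]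
    · by_cases hcp : c = p
      · subst hcp; simp
      · have : ¬ (c.1 = p.1 ∧ c.2 = p.2) := by
          intro hq; exact hcp (Prod.ext hq.1 hq.2)
        simp [hcw, hcp, this]

lemma pvAt_walled {N M : Int} {g : List (List Int)} {w : List (Int × Int)}
    (ctx : pvCtx N M g w) :
    ∀ c : Int × Int, pvAt (pvWalled g w) c.1 c.2 = if c ∈ w then 1 else pvAt g c.1 c.2 := by
  apply pvAt_foldl_set
  intro p hp
  exact pvCtx_win_inGrid ctx (ctx.2 p hp).1

lemma pvInv_init {N M : Int} {g : List (List Int)} {w : List (Int × Int)}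
    (ctx : pvCtx N M g w) : pvInv N M g w (pvWalled g w) ∅ := by
  refine ⟨pvWalled_map_length g w, by simp, ?_⟩
  intro c
  simp

-- ---------- characterisation of A's bfs ----------
lemma pvGuardA {N M : Int} {g : List (List Int)} {w : List (Int × Int)}
    (ctx : pvCtx N M g w) {t : List (List Int)} {S : Finset (Int × Int)}
    (hInv : pvInv N M g w t S) (c : Int × Int)
    (hc : -1 ≤ c.1 ∧ c.1 ≤ N ∧ -1 ≤ c.2 ∧ c.2 ≤ M) :
    (¬ (c.1 = -1 ∨ c.1 = N ∨ c.2 = -1 ∨ c.2 = M ∨ pvInGrid t c.1 c.2 = false ∨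
        pvAt t c.1 c.2 ≠ 0)) ↔ (pvOW N M g w c ∧ c ∉ S) := by
  obtain ⟨hshape, hSOW, hval⟩ := hInv
  constructor
  · intro h
    push_neg at h
    obtain ⟨h1, h2, h3, h4, h5, h6⟩ := h
    have hwin : pvWin N M c := ⟨by omega, by omega, by omega, by omega⟩
    have hS : c ∉ S := by
      intro hcS
      have := hval c
      rw [if_pos hcS] at this
      rw [this] at h6; exact absurd h6 (by norm_num)
    have hg : pvAt (pvWalled g w) c.1 c.2 = 0 := by
      have := hval c
      rw [if_neg hS] at this
      rw [← this]; exact h6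
    rw [pvAt_walled ctx c] at hg
    by_cases hw : c ∈ w
    · rw [if_pos hw] at hg; exact absurd hg (by norm_num)
    · rw [if_neg hw] at hg
      exact ⟨⟨hwin, hg, hw⟩, hS⟩
  · rintro ⟨⟨hwin, hg0, hgw⟩, hS⟩
    have hin : pvInGrid t c.1 c.2 = true := by
      rw [pvInGrid_congr hshape]
      exact pvCtx_win_inGrid ctx hwin
    have hvt : pvAt t c.1 c.2 = 0 := by
      have := hval c
      rw [if_neg hS, pvAt_walled ctx c, if_neg hgw] at this
      rw [this]; exact hg0
    obtain ⟨w1, w2, w3, w4⟩ := hwin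
    push_neg
    exact ⟨by omega, by omega, by omega, by omega, by rw [hin]; simp, hvt⟩

lemma pvNbrs_nodup (x y : Int) : (pvNbrs x y).Nodup := by
  simp [pvNbrs, Prod.ext_iff] <;> omega

lemma pvNbrs_bounds {N M : Int} {q : Int × Int} (hq : pvWin N M q) :
    ∀ c ∈ pvNbrs q.1 q.2, -1 ≤ c.1 ∧ c.1 ≤ N ∧ -1 ≤ c.2 ∧ c.2 ≤ M := by
  obtain ⟨h1, h2, h3, h4⟩ := hq
  intro c hc
  simp only [pvNbrs, List.mem_cons, List.not_mem_nil, or_false] at hc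
  rcases hc with rfl | rfl | rfl | rfl
  · exact ⟨by omega, by omega, by omega, by omega⟩
  · exact ⟨by omega, by omega, by omega, by omega⟩
  · exact ⟨by omega, by omega, by omega, by omega⟩
  · exact ⟨by omega, by omega, by omega, by omega⟩

lemma pvScanA_char {N M : Int} {g : List (List Int)} {w : List (Int × Int)}
    (ctx : pvCtx N M g w) :
    ∀ (ns : List (Int × Int)) (t : List (List Int)) (a : Int) (app : List (Int × Int))
      (S : Finset (Int × Int)), pvInv N M g w t S → ns.Nodup →
      (∀ c ∈ ns, -1 ≤ c.1 ∧ c.1 ≤ N ∧ -1 ≤ c.2 ∧ c.2 ≤ M) →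
      (pvScan N M ns t a app).2.1 =
          a + ((ns.filter (fun c => decide (pvOW N M g w c ∧ c ∉ S))).length : Int) ∧
      (pvScan N M ns t a app).2.2 = app ++ ns.filter (fun c => decide (pvOW N M g w c ∧ c ∉ S)) ∧
      pvInv N M g w (pvScan N M ns t a app).1
        (S ∪ (ns.filter (fun c => decide (pvOW N M g w c ∧ c ∉ S))).toFinset) := by
  intro ns
  induction ns with
  | nil =>
    intro t a app S hInv _ _
    simpa [pvScan] using hInv
  | cons c ns ih =>
    intro t a app S hInv hnd hb
    have hbc := hb c List.mem_cons_self
    have hguard := pvGuardA ctx hInv c hbc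
    have hcns : c ∉ ns := (List.nodup_cons.mp hnd).1
    rw [pvScan]
    by_cases hopen : pvOW N M g w c ∧ c ∉ S
    · rw [if_neg (fun hg => (by
        have := hguard.mpr hopen
        exact this hg))]
      have hin : pvInGrid t c.1 c.2 = true := by
        rw [pvInGrid_congr hInv.1]
        exact pvCtx_win_inGrid ctx hopen.1.1
      have hInv' : pvInv N M g w (pvSet t c.1 c.2 1) (S ∪ {c}) := by
        refine ⟨by rw [pvSet_map_length]; exact hInv.1, ?_, ?_⟩
        · intro d hd
          rcases Finset.mem_union.mp hd with hd | hd
          · exact hInv.2.1 d hd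
          · rw [Finset.mem_singleton] at hd; subst hd; exact hopen.1
        · intro d
          rw [pvAt_pvSet hin 1 d.1 d.2]
          by_cases hdc : d = c
          · subst hdc; simp
          · have hne : ¬ (d.1 = c.1 ∧ d.2 = c.2) := by
              intro hq; exact hdc (Prod.ext hq.1 hq.2)
            rw [if_neg hne, hInv.2.2 d]
            exact if_congr (by simp [Finset.mem_union, hdc]) rfl rfl
      have ih' := ih (pvSet t c.1 c.2 1) (a + 1) (app ++ [c]) (S ∪ {c}) hInv'
        (List.Nodup.of_cons hnd) (fun d hd => hb d (List.mem_cons_of_mem c hd))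
      have hfc : ns.filter (fun d => decide (pvOW N M g w d ∧ d ∉ S ∪ {c})) =
          ns.filter (fun d => decide (pvOW N M g w d ∧ d ∉ S)) := by
        apply List.filter_congr
        intro d hd
        have hdc : d ≠ c := fun h => hcns (h ▸ hd)
        apply decide_eq_decide.mpr
        simp [Finset.mem_union, hdc]
      rw [hfc] at ih'
      rw [List.filter_cons_of_pos (p := fun d => decide (pvOW N M g w d ∧ d ∉ S))
        (a := c) (l := ns) (by simpa using hopen)]
      refine ⟨?_, ?_, ?_⟩
      · rw [ih'.1, List.length_cons]; push_cast; ring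
      · rw [ih'.2.1]; simp
      · have hU : S ∪ (c :: ns.filter (fun d => decide (pvOW N M g w d ∧ d ∉ S))).toFinset =
            (S ∪ {c}) ∪ (ns.filter (fun d => decide (pvOW N M g w d ∧ d ∉ S))).toFinset := by
          ext d
          simp only [Finset.mem_union, Finset.mem_singleton, List.mem_toFinset, List.mem_cons]
          tauto
        rw [hU]
        exact ih'.2.2
    · have hgd : (c.1 = -1 ∨ c.1 = N ∨ c.2 = -1 ∨ c.2 = M ∨ pvInGrid t c.1 c.2 = false ∨
          pvAt t c.1 c.2 ≠ 0) := by
        by_contra hng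
        exact hopen (hguard.mp hng)
      rw [if_pos hgd]
      rw [List.filter_cons_of_neg (p := fun d => decide (pvOW N M g w d ∧ d ∉ S))
        (a := c) (l := ns) (by simpa using hopen)]
      exact ih t a app S hInv (List.Nodup.of_cons hnd)
        (fun d hd => hb d (List.mem_cons_of_mem c hd))

lemma pvBfsLoop_char {N M : Int} {g : List (List Int)} {w : List (Int × Int)}
    (ctx : pvCtx N M g w) :
    ∀ (n : Nat) (Q : List (Int × Int)) (t : List (List Int)) (a : Int)
      (S : Finset (Int × Int)), n = pvOpenCount t + Q.length →
      pvInv N M g w t S → (∀ q ∈ Q, pvWin N M q) →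
      ∃ T : Finset (Int × Int),
        pvInv N M g w (pvBfsLoop N M Q t a).1 T ∧ S ⊆ T ∧
        (pvBfsLoop N M Q t a).2 = a + ((T.card : Int) - (S.card : Int)) ∧
        (∀ c, c ∈ T ↔ c ∈ S ∨ pvReach (fun c => pvOW N M g w c ∧ c ∉ S) (· ∈ Q) c) := by
  intro n
  induction n using Nat.strong_induction_on with
  | _ n ih =>
    intro Q t a S hn hInv hQ
    match Q with
    | [] =>
      refine ⟨S, by simpa [pvBfsLoop] using hInv, Finset.Subset.refl S, by simp [pvBfsLoop], ?_⟩
      intro c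
      constructor
      · exact fun h => Or.inl h
      · rintro (h | h)
        · exact h
        · exact absurd h (pvReach_src_empty (by simp) c)
    | q :: Q' =>
      have hqwin : pvWin N M q := hQ q List.mem_cons_self
      have hscan := pvScanA_char ctx (pvNbrs q.1 q.2) t a [] S hInv
        (pvNbrs_nodup q.1 q.2) (pvNbrs_bounds hqwin)
      set F := (pvNbrs q.1 q.2).filter (fun c => decide (pvOW N M g w c ∧ c ∉ S)) with hF
      obtain ⟨hs1, hs2, hsI⟩ := hscan
      rw [List.nil_append] at hs2
      have hFnodup : F.Nodup := List.Nodup.filter _ (pvNbrs_nodup q.1 q.2)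
      have hFnotS : ∀ c ∈ F, c ∉ S := by
        intro c hc
        have := (List.mem_filter.mp hc).2
        simp only [decide_eq_true_eq] at this
        exact this.2
      have hFOW : ∀ c ∈ F, pvOW N M g w c := by
        intro c hc
        have := (List.mem_filter.mp hc).2
        simp only [decide_eq_true_eq] at this
        exact this.1
      have hmeas := pvScan_meas N M (pvNbrs q.1 q.2) t a []
      rw [hs2] at hmeas
      simp only [List.length_nil, Nat.add_zero] at hmeas
      rw [pvBfsLoop]
      have hlt : pvOpenCount (pvScan N M (pvNbrs q.1 q.2) t a []).1 +
          (Q' ++ (pvScan N M (pvNbrs q.1 q.2) t a []).2.2).length < n := by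
        rw [hs2, List.length_append, hn]
        simp only [List.length_cons]
        omega
      have hwin' : ∀ p ∈ Q' ++ (pvScan N M (pvNbrs q.1 q.2) t a []).2.2, pvWin N M p := by
        intro p hp
        rcases List.mem_append.mp hp with hp | hp
        · exact hQ p (List.mem_cons_of_mem q hp)
        · rw [hs2] at hp; exact (hFOW p hp).1
      obtain ⟨T, hInvT, hsubT, hvalT, hcharT⟩ := ih _ hlt
        (Q' ++ (pvScan N M (pvNbrs q.1 q.2) t a []).2.2)
        (pvScan N M (pvNbrs q.1 q.2) t a []).1
        (pvScan N M (pvNbrs q.1 q.2) t a []).2.1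
        (S ∪ F.toFinset) rfl hsI hwin'
      refine ⟨T, hInvT, ?_, ?_, ?_⟩
      · exact (Finset.subset_union_left).trans hsubT
      · rw [hvalT, hs1]
        have hdisj : Disjoint S F.toFinset := by
          rw [Finset.disjoint_right]
          intro c hc
          exact hFnotS c (List.mem_toFinset.mp hc)
        have hcardU : (S ∪ F.toFinset).card = S.card + F.length := by
          rw [Finset.card_union_of_disjoint hdisj, List.toFinset_card_of_nodup hFnodup]
        rw [hcardU]
        push_cast
        ring
      · intro c
        have hcrux := pvCrux (O := fun c => pvOW N M g w c ∧ c ∉ S)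
          (O' := fun c => pvOW N M g w c ∧ c ∉ (S ∪ F.toFinset))
          (src := (· ∈ q :: Q')) (src' := (· ∈ Q')) (x := q) (F := F)
          List.mem_cons_self
          (by
            intro d hd
            refine ⟨⟨hFOW d hd, hFnotS d hd⟩, ?_⟩
            exact List.mem_of_mem_filter hd)
          (by
            intro d hadj hOd
            exact List.mem_filter.mpr ⟨hadj, by simpa using hOd⟩)
          (by
            intro d
            constructor
            · rintro ⟨hOW, hd⟩
              rw [Finset.mem_union] at hd
              push_neg at hd
              exact ⟨⟨hOW, hd.1⟩, fun hdF => hd.2 (List.mem_toFinset.mpr hdF)⟩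
            · rintro ⟨⟨hOW, hdS⟩, hdF⟩
              refine ⟨hOW, ?_⟩
              rw [Finset.mem_union]
              push_neg
              exact ⟨hdS, fun h => hdF (List.mem_toFinset.mp h)⟩)
          (fun y hy => List.mem_cons_of_mem q hy)
          (by
            intro y hy
            rcases List.mem_cons.mp hy with h | h
            · exact Or.inr h
            · exact Or.inl h)
          c
        rw [hcharT c]
        have hsrc : ∀ y, (y ∈ Q' ++ (pvScan N M (pvNbrs q.1 q.2) t a []).2.2) ↔
            ((y ∈ Q') ∨ y ∈ F) := by
          intro y
          rw [hs2, List.mem_append]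
        rw [pvReach_congr (fun d => Iff.rfl) hsrc c]
        constructor
        · rintro (hS1 | hr)
          · rcases Finset.mem_union.mp hS1 with h | h
            · exact Or.inl h
            · exact Or.inr (hcrux.mpr (Or.inl (List.mem_toFinset.mp h)))
          · exact Or.inr (hcrux.mpr (Or.inr hr))
        · rintro (hS | hr)
          · exact Or.inl (Finset.mem_union_left _ hS)
          · rcases hcrux.mp hr with h | h
            · exact Or.inl (Finset.mem_union_right _ (List.mem_toFinset.mpr h))
            · exact Or.inr h

lemma pvInner_char {N M : Int} {g : List (List Int)} {w : List (Int × Int)}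
    (ctx : pvCtx N M g w) :
    ∀ (vs : List (Int × Int)) (t : List (List Int)) (S : Finset (Int × Int))
      (newAns ans : Int), pvInv N M g w t S → (∀ v ∈ vs, pvWin N M v) →
      ∃ T : Finset (Int × Int), S ⊆ T ∧
        (∀ c, c ∈ T ↔ c ∈ S ∨ pvReach (fun c => pvOW N M g w c ∧ c ∉ S) (· ∈ vs) c) ∧
        max ans (pvInner N M ans vs t newAns) =
          max ans (newAns - ((T.card : Int) - (S.card : Int))) := by
  intro vs
  induction vs with
  | nil =>
    intro t S newAns ans hInv _
    refine ⟨S, Finset.Subset.refl S, ?_, by simp [pvInner]⟩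
    intro c
    constructor
    · exact fun h => Or.inl h
    · rintro (h | h)
      · exact h
      · exact absurd h (pvReach_src_empty (by simp) c)
  | cons v vs ih =>
    intro t S newAns ans hInv hw
    obtain ⟨S1, hInv1, hsub1, hval1, hchar1⟩ := pvBfsLoop_char ctx
      (pvOpenCount t + 1) [v] t 0 S (by simp) hInv
      (by intro p hp; rw [List.mem_singleton] at hp; rw [hp]; exact hw v List.mem_cons_self)
    obtain ⟨T, hsubT, hcharT, hmaxT⟩ := ih (pvBfsLoop N M [v] t 0).1 S1
      (newAns - (pvBfsLoop N M [v] t 0).2) ans hInv1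
      (fun u hu => hw u (List.mem_cons_of_mem v hu))
    have hcharT' : ∀ c, c ∈ T ↔ c ∈ S ∨
        pvReach (fun c => pvOW N M g w c ∧ c ∉ S) (· ∈ v :: vs) c := by
      intro c
      rw [hcharT c]
      exact pvSeqComp (P := pvOW N M g w) hchar1 c
    refine ⟨T, hsub1.trans hsubT, hcharT', ?_⟩
    have hc1 : (pvBfsLoop N M [v] t 0).2 = (S1.card : Int) - (S.card : Int) := by
      rw [hval1]; ring
    have hcard1 : S1.card ≤ T.card := Finset.card_le_card hsubT
    have hcard0 : S.card ≤ S1.card := Finset.card_le_card hsub1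
    show max ans (pvInner N M ans (v :: vs) t newAns) = _
    rw [pvInner]
    show max ans (if newAns - (pvBfs N M v.1 v.2 t).2 ≤ ans then
        newAns - (pvBfs N M v.1 v.2 t).2
      else pvInner N M ans vs (pvBfs N M v.1 v.2 t).1 (newAns - (pvBfs N M v.1 v.2 t).2)) = _
    have hbfs : pvBfs N M v.1 v.2 t = pvBfsLoop N M [v] t 0 := rfl
    rw [hbfs]
    by_cases hbr : newAns - (pvBfsLoop N M [v] t 0).2 ≤ ans
    · rw [if_pos hbr]
      have h1 : newAns - ((T.card : Int) - (S.card : Int)) ≤ ans := by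
        rw [hc1] at hbr
        omega
      rw [max_eq_left hbr, max_eq_left h1]
    · rw [if_neg hbr]
      have halg : newAns - (pvBfsLoop N M [v] t 0).2 - ((T.card : Int) - (S1.card : Int)) =
          newAns - ((T.card : Int) - (S.card : Int)) := by
        rw [hc1]; ring
      rw [← halg]
      exact hmaxT

-- ---------- characterisation of B's fixed-point propagation ----------
lemma pvNbrs_symm {c d : Int × Int} (h : d ∈ pvNbrs c.1 c.2) : c ∈ pvNbrs d.1 d.2 := by
  obtain ⟨c1, c2⟩ := c
  obtain ⟨d1, d2⟩ := d
  simp only [pvNbrs, List.mem_cons, List.not_mem_nil, or_false, Prod.mk.injEq] at h ⊢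
  omega

lemma pvReach_absorb {O : Int × Int → Prop} {inf new : List (Int × Int)}
    (h : ∀ s ∈ new, s ∈ inf ∨ pvReach O (· ∈ inf) s) :
    ∀ c, pvReach O (· ∈ new) c → pvReach O (· ∈ inf) c := by
  intro c hr
  induction hr with
  | base hx hadj hO =>
    rcases h _ hx with h' | h'
    · exact pvReach.base h' hadj hO
    · exact pvReach.step h' hadj hO
  | step _ hadj hO ih => exact pvReach.step ih hadj hO

lemma pvSweep_mem (g : List (List Int)) (w : List (Int × Int)) (cells inf : List (Int × Int))
    (c : Int × Int) :
    c ∈ pvSweep g w cells inf ↔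
      c ∈ cells ∧ (c ∈ inf ∨ (pvAt g c.1 c.2 = 0 ∧ c ∉ w ∧ ∃ d ∈ pvNbrs c.1 c.2, d ∈ inf)) := by
  simp only [pvSweep, List.mem_filter, Bool.or_eq_true, Bool.and_eq_true, decide_eq_true_eq,
    List.any_eq_true]
  constructor
  · rintro ⟨h1, h2⟩
    refine ⟨h1, ?_⟩
    rcases h2 with h | ⟨⟨ha, hb⟩, d, hd1, hd2⟩
    · exact Or.inl h
    · exact Or.inr ⟨ha, hb, d, hd1, by simpa using hd2⟩
  · rintro ⟨h1, h2⟩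
    refine ⟨h1, ?_⟩
    rcases h2 with h | ⟨ha, hb, d, hd1, hd2⟩
    · exact Or.inl h
    · exact Or.inr ⟨⟨ha, hb⟩, d, hd1, by simpa using hd2⟩

lemma pvSweep_superset {g : List (List Int)} {w : List (Int × Int)}
    {cells inf : List (Int × Int)} (hsub : inf ⊆ cells) :
    ∀ c ∈ inf, c ∈ pvSweep g w cells inf := by
  intro c hc
  exact (pvSweep_mem g w cells inf c).mpr ⟨hsub hc, Or.inl hc⟩

lemma pvNodup_length_lt {l l' : List (Int × Int)} (h : l'.Nodup) (hn : l.Nodup)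
    (hs : l' ⊆ l) (x : Int × Int) (hx : x ∈ l) (hnx : x ∉ l') : l'.length < l.length := by
  have h1 := List.toFinset_card_of_nodup h
  have h1b := List.toFinset_card_of_nodup hn
  have h2 : l'.toFinset ⊂ l.toFinset := by
    constructor
    · intro y hy; rw [List.mem_toFinset] at *; exact hs hy
    · intro hsub
      exact hnx (List.mem_toFinset.mp (hsub (List.mem_toFinset.mpr hx)))
  have := Finset.card_lt_card h2
  omega

lemma pvNodup_length_le {l l' : List (Int × Int)} (h : l'.Nodup) (hs : l' ⊆ l) :
    l'.length ≤ l.length := by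
  have h1 := List.toFinset_card_of_nodup h
  have h2 : l'.toFinset ⊆ l.toFinset := by
    intro y hy; rw [List.mem_toFinset] at *; exact hs hy
  have := Finset.card_le_card h2
  have := l.toFinset_card_le
  omega

-- the propagation loop: invariants, the fixpoint it ends in, and soundness of every
-- infected cell (it is a seed or reachable from a seed through open non-wall cells)
lemma pvPropagate_spec (g : List (List Int)) (w : List (Int × Int))
    (cells : List (Int × Int)) (hcn : cells.Nodup) :
    ∀ (fuel : Nat) (inf : List (Int × Int)), inf.Nodup → inf ⊆ cells →
      cells.length + 1 ≤ fuel + inf.length →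
      (pvPropagate g w cells fuel inf).Nodup ∧
      (pvPropagate g w cells fuel inf) ⊆ cells ∧
      (∀ c ∈ inf, c ∈ pvPropagate g w cells fuel inf) ∧
      (∀ c, c ∈ pvSweep g w cells (pvPropagate g w cells fuel inf) ↔
        c ∈ pvPropagate g w cells fuel inf) ∧
      (∀ c ∈ pvPropagate g w cells fuel inf,
        c ∈ inf ∨ pvReach (fun c => c ∈ cells ∧ pvAt g c.1 c.2 = 0 ∧ c ∉ w) (· ∈ inf) c) := by
  intro fuel
  induction fuel with
  | zero =>
    intro inf hnd hsub hfuel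
    exact absurd hfuel (by have := pvNodup_length_le hnd hsub; omega)
  | succ k ih =>
    intro inf hnd hsub hfuel
    rw [pvPropagate]
    by_cases hcond : ((pvSweep g w cells inf).all (fun c => decide (c ∈ inf)) &&
        inf.all (fun c => decide (c ∈ pvSweep g w cells inf))) = true
    · rw [if_pos hcond]
      rw [Bool.and_eq_true, List.all_eq_true, List.all_eq_true] at hcond
      refine ⟨hnd, hsub, fun c hc => hc, ?_, fun c hc => Or.inl hc⟩
      intro c
      constructor
      · intro hc
        have := hcond.1 c hc
        simpa using this
      · intro hc
        exact pvSweep_superset hsub c hc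
    · rw [if_neg hcond]
      set new := pvSweep g w cells inf with hnew
      have hnewnd : new.Nodup := List.Nodup.filter _ hcn
      have hnewsub : new ⊆ cells := fun c hc => List.mem_of_mem_filter hc
      have hinfnew : ∀ c ∈ inf, c ∈ new := pvSweep_superset hsub
      have hall2 : inf.all (fun c => decide (c ∈ new)) = true := by
        rw [List.all_eq_true]
        intro c hc
        simpa using hinfnew c hc
      have hex : ∃ c ∈ new, c ∉ inf := by
        by_contra hno
        push_neg at hno
        apply hcond
        rw [Bool.and_eq_true, List.all_eq_true]
        refine ⟨?_, hall2⟩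
        intro c hc
        simpa using hno c hc
      obtain ⟨x, hxnew, hxinf⟩ := hex
      have hlen : inf.length < new.length :=
        pvNodup_length_lt hnd hnewnd (fun c hc => hinfnew c hc) x hxnew hxinf
      have hIH := ih new hnewnd hnewsub (by omega)
      obtain ⟨i1, i2, i3, i4, i5⟩ := hIH
      have hnewsound : ∀ s ∈ new, s ∈ inf ∨
          pvReach (fun c => c ∈ cells ∧ pvAt g c.1 c.2 = 0 ∧ c ∉ w) (· ∈ inf) s := by
        intro s hs
        rcases (pvSweep_mem g w cells inf s).mp hs with ⟨hcell, hor⟩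
        rcases hor with h | ⟨h0, hw', d, hd, hdinf⟩
        · exact Or.inl h
        · exact Or.inr (pvReach.base hdinf (pvNbrs_symm hd) ⟨hcell, h0, hw'⟩)
      refine ⟨i1, i2, fun c hc => i3 c (hinfnew c hc), i4, ?_⟩
      intro c hc
      rcases i5 c hc with h | h
      · exact hnewsound c h
      · exact Or.inr (pvReach_absorb hnewsound c h)

-- the full characterisation of the propagation result solution_alt uses
lemma pvPropagate_char (g : List (List Int)) (w : List (Int × Int))
    (cells : List (Int × Int)) (hcn : cells.Nodup) (inf0 : List (Int × Int))
    (hnd : inf0.Nodup) (hsub : inf0 ⊆ cells) :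
    (pvPropagate g w cells (cells.length + 1) inf0).Nodup ∧
    (∀ c, c ∈ pvPropagate g w cells (cells.length + 1) inf0 ↔
      c ∈ inf0 ∨ pvReach (fun c => c ∈ cells ∧ pvAt g c.1 c.2 = 0 ∧ c ∉ w) (· ∈ inf0) c) := by
  obtain ⟨h1, h2, h3, h4, h5⟩ :=
    pvPropagate_spec g w cells hcn (cells.length + 1) inf0 hnd hsub (by omega)
  refine ⟨h1, ?_⟩
  set F := pvPropagate g w cells (cells.length + 1) inf0 with hF
  have hcomplete : ∀ c, pvReach (fun c => c ∈ cells ∧ pvAt g c.1 c.2 = 0 ∧ c ∉ w)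
      (· ∈ inf0) c → c ∈ F := by
    intro c hr
    induction hr with
    | @base x y hx hadj hO =>
      refine (h4 y).mp ((pvSweep_mem g w cells F y).mpr
        ⟨hO.1, Or.inr ⟨hO.2.1, hO.2.2, x, pvNbrs_symm hadj, h3 x hx⟩⟩)
    | @step x y _ hadj hO ihc =>
      exact (h4 y).mp ((pvSweep_mem g w cells F y).mpr
        ⟨hO.1, Or.inr ⟨hO.2.1, hO.2.2, x, pvNbrs_symm hadj, ihc⟩⟩)
  intro c
  constructor
  · exact h5 c
  · rintro (h | h)
    · exact h3 c h
    · exact hcomplete c h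

-- ---------- B's suffix loops are a fold over combinations ----------
lemma pvComb_one {α : Type} (l : List α) :
    PySem.List.combinations l 1 = l.map (fun x => [x]) := by
  induction l with
  | nil => simp [PySem.List.combinations_nil_succ]
  | cons x xs ih =>
    rw [PySem.List.combinations_cons_succ, PySem.List.combinations_zero, ih]
    simp

lemma pvLoop3_eq (g : List (List Int)) (cells empties : List (Int × Int)) (w1 w2 : Int × Int) :
    ∀ (l : List (Int × Int)) (best : Int),
      pvLoop3 g cells empties w1 w2 l best =
        l.foldl (fun b w3 => max b (pvEval g cells empties w1 w2 w3)) best := by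
  intro l
  induction l with
  | nil => intro best; rfl
  | cons x xs ih => intro best; rw [pvLoop3, ih, List.foldl_cons]

lemma pvLoop2_eq (g : List (List Int)) (cells empties : List (Int × Int)) (w1 : Int × Int) :
    ∀ (l : List (Int × Int)) (best : Int),
      pvLoop2 g cells empties w1 l best =
        (PySem.List.combinations l 2).foldl (fun b c =>
          match c with
          | [w2, w3] => max b (pvEval g cells empties w1 w2 w3)
          | _ => b) best := by
  intro l
  induction l with
  | nil => intro best; simp [pvLoop2, PySem.List.combinations_nil_succ]
  | cons x xs ih =>
    intro best
    rw [pvLoop2, ih, PySem.List.combinations_cons_succ, List.foldl_append, List.foldl_map,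
      pvComb_one, List.foldl_map, pvLoop3_eq]

lemma pvLoop1_eq (g : List (List Int)) (cells empties : List (Int × Int)) :
    ∀ (l : List (Int × Int)) (best : Int),
      pvLoop1 g cells empties l best =
        (PySem.List.combinations l 3).foldl (fun b c =>
          match c with
          | [w1, w2, w3] => max b (pvEval g cells empties w1 w2 w3)
          | _ => b) best := by
  intro l
  induction l with
  | nil => intro best; simp [pvLoop1, PySem.List.combinations_nil_succ]
  | cons x xs ih =>
    intro best
    rw [pvLoop1, ih, PySem.List.combinations_cons_succ, List.foldl_append, List.foldl_map,
      pvLoop2_eq]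
    congr 1
    exact PySem.List.foldl_congr_mem _ _ _ best (fun b c _ => by
      rcases c with _ | ⟨a, _ | ⟨a', _ | rest⟩⟩ <;> rfl)

-- ---------- counting the safe cells ----------
lemma pvSafeCount {empties virus F W : List (Int × Int)} {T : Finset (Int × Int)}
    (hempnd : empties.Nodup) (hW3 : W.length = 3) (hWnd : W.Nodup)
    (hWsub : ∀ p ∈ W, p ∈ empties) (hFnd : F.Nodup)
    (hchar : ∀ c, c ∈ F ↔ c ∈ virus ∨ c ∈ T)
    (hT : ∀ c ∈ T, c ∈ empties ∧ c ∉ W)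
    (hvir : ∀ c ∈ virus, c ∉ empties) :
    ((empties.filter (fun e => decide (e ∉ W) && decide (e ∉ F))).length : Int) =
      (empties.length : Int) - 3 - (T.card : Int) := by
  have hfilnd : (empties.filter (fun e => decide (e ∉ W) && decide (e ∉ F))).Nodup :=
    List.Nodup.filter _ hempnd
  have hkey : (empties.filter (fun e => decide (e ∉ W) && decide (e ∉ F))).toFinset =
      empties.toFinset \ (W.toFinset ∪ F.toFinset) := by
    ext e
    simp only [List.mem_toFinset, List.mem_filter, Finset.mem_sdiff, Finset.mem_union,
      Bool.and_eq_true, decide_eq_true_eq]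
    tauto
  have hinter : empties.toFinset ∩ (W.toFinset ∪ F.toFinset) = W.toFinset ∪ T := by
    ext e
    simp only [Finset.mem_inter, Finset.mem_union, List.mem_toFinset]
    constructor
    · rintro ⟨hemp, hWF⟩
      rcases hWF with h | h
      · exact Or.inl h
      · rcases (hchar e).mp h with h' | h'
        · exact absurd hemp (hvir e h')
        · exact Or.inr h'
    · rintro (h | h)
      · exact ⟨hWsub e h, Or.inl h⟩
      · exact ⟨(hT e h).1, Or.inr ((hchar e).mpr (Or.inr h))⟩
  have hdisj : Disjoint W.toFinset T := by
    rw [Finset.disjoint_left]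
    intro e he
    exact fun heT => (hT e heT).2 (List.mem_toFinset.mp he)
  have hcardW : W.toFinset.card = 3 := by
    rw [List.toFinset_card_of_nodup hWnd, hW3]
  have hsdiff := Finset.card_sdiff_add_card_inter empties.toFinset (W.toFinset ∪ F.toFinset)
  rw [hinter, Finset.card_union_of_disjoint hdisj, hcardW] at hsdiff
  have hlen1 : (empties.filter (fun e => decide (e ∉ W) && decide (e ∉ F))).length =
      (empties.toFinset \ (W.toFinset ∪ F.toFinset)).card := by
    rw [← hkey, List.toFinset_card_of_nodup hfilnd]
  have hlen2 : empties.toFinset.card = empties.length := List.toFinset_card_of_nodup hempnd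
  omega

-- ---------- outer-level lemmas ----------
lemma pvCombinations_filter {α : Type} (p : α → Bool) :
    ∀ (xs : List α) (r : Nat),
      PySem.List.combinations (xs.filter p) r =
        (PySem.List.combinations xs r).filter (fun c => c.all p) := by
  intro xs
  induction xs with
  | nil =>
    intro r
    cases r with
    | zero => simp [PySem.List.combinations_zero]
    | succ r => simp [PySem.List.combinations_nil_succ]
  | cons x xs ih =>
    intro r
    cases r with
    | zero => simp [PySem.List.combinations_zero]
    | succ r =>
      rw [List.filter_cons]
      by_cases hx : p x
      · rw [if_pos hx, PySem.List.combinations_cons_succ, PySem.List.combinations_cons_succ,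
          List.filter_append, List.filter_map, ih r, ih (r + 1)]
        congr 1
        congr 1
        apply List.filter_congr
        intro c _
        simp [Function.comp, List.all_cons, hx]
      · have hx' : p x = false := by simpa using hx
        rw [if_neg (by simp [hx']), PySem.List.combinations_cons_succ, List.filter_append,
          List.filter_map, ih (r + 1)]
        have hnil : (PySem.List.combinations xs r).filter
            ((fun c => c.all p) ∘ (fun c => x :: c)) = [] := by
          apply List.filter_eq_nil_iff.mpr
          intro c _
          simp [Function.comp, List.all_cons, hx']
        rw [hnil, List.map_nil, List.nil_append]

lemma pvFoldl_eq_foldl_filter {α β : Type} (p : α → Bool) (f : β → α → β) :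
    ∀ (l : List α) (init : β), (∀ acc, ∀ x ∈ l, p x = false → f acc x = acc) →
      l.foldl f init = (l.filter p).foldl f init := by
  intro l
  induction l with
  | nil => intro init _; rfl
  | cons x l ih =>
    intro init h
    rw [List.foldl_cons, List.filter_cons]
    by_cases hx : p x
    · rw [if_pos hx, List.foldl_cons]
      exact ih (f init x) (fun acc y hy => h acc y (List.mem_cons_of_mem x hy))
    · rw [if_neg (by simpa using hx), h init x List.mem_cons_self (by simpa using hx)]
      exact ih init (fun acc y hy => h acc y (List.mem_cons_of_mem x hy))

lemma pvMem_product {N M : Int} {c : Int × Int} :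
    c ∈ pvProduct N M ↔ pvWin N M c := by
  obtain ⟨c1, c2⟩ := c
  rw [pvProduct, List.mem_product, PySem.List.mem_pyRange_one, PySem.List.mem_pyRange_one]
  unfold pvWin
  constructor
  · rintro ⟨⟨a, b⟩, ⟨d, e⟩⟩; exact ⟨a, b, d, e⟩
  · rintro ⟨a, b, d, e⟩; exact ⟨⟨a, b⟩, ⟨d, e⟩⟩

lemma pvProduct_nodup (N M : Int) : (pvProduct N M).Nodup :=
  List.Nodup.product (PySem.List.nodup_pyRange_one 0 N) (PySem.List.nodup_pyRange_one 0 M)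

lemma pvFilter_flatMap {α β : Type} (p : β → Bool) (f : α → List β) :
    ∀ l : List α, (l.flatMap f).filter p = l.flatMap (fun x => (f x).filter p) := by
  intro l
  induction l with
  | nil => rfl
  | cons x l ih => rw [List.flatMap_cons, List.flatMap_cons, List.filter_append, ih]

lemma pvFindViruss_eq (N M : Int) (g : List (List Int)) :
    pvFindViruss N M g = (pvProduct N M).filter (fun c => decide (pvAt g c.1 c.2 = 2)) := by
  unfold pvFindViruss
  rw [PySem.List.foldl_congr_mem (PySem.List.pyRange 0 N) _
    (fun xys i => xys ++ ((PySem.List.pyRange 0 M).filter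
      (fun j => decide (pvAt g i j = 2))).map (fun j => (i, j))) []
    (fun acc i _ => PySem.List.foldl_append_ite (p := fun j => pvAt g i j = 2)
      (f := fun j => (i, j)) (PySem.List.pyRange 0 M) acc)]
  rw [PySem.List.foldl_append_eq_flatMap
    (fun i => ((PySem.List.pyRange 0 M).filter (fun j => decide (pvAt g i j = 2))).map
      (fun j => (i, j))) (PySem.List.pyRange 0 N) []]
  rw [List.nil_append]
  show _ = ((PySem.List.pyRange 0 N).flatMap
    (fun a => (PySem.List.pyRange 0 M).map (Prod.mk a))).filter
      (fun c => decide (pvAt g c.1 c.2 = 2))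
  rw [pvFilter_flatMap]
  congr 1
  funext i
  rw [List.filter_map]
  rfl

lemma pvGetMaxAns_eq (N M : Int) (g : List (List Int)) :
    pvGetMaxAns N M g =
      (((pvProduct N M).filter (fun c => decide (pvAt g c.1 c.2 = 0))).length : Int) - 3 := by
  unfold pvGetMaxAns
  rw [PySem.List.foldl_congr_mem (PySem.List.pyRange 0 N) _
    (fun a i => a + (((PySem.List.pyRange 0 M).countP (fun j => decide (pvAt g i j = 0))) : Int)) 0
    (fun acc i _ => PySem.List.foldl_ite_add_one (p := fun j => pvAt g i j = 0)
      (PySem.List.pyRange 0 M) acc)]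
  rw [PySem.List.foldl_add (g := fun i =>
    (((PySem.List.pyRange 0 M).countP (fun j => decide (pvAt g i j = 0))) : Int))
    (PySem.List.pyRange 0 N) 0]
  rw [zero_add]
  congr 1
  rw [← List.countP_eq_length_filter]
  show _ = (((PySem.List.pyRange 0 N).flatMap
    (fun a => (PySem.List.pyRange 0 M).map (Prod.mk a))).countP
      (fun c => decide (pvAt g c.1 c.2 = 0)) : Int)
  rw [List.countP_flatMap, Nat.cast_list_sum, List.map_map]
  congr 1
  apply List.map_congr_left
  intro i _
  simp only [Function.comp_apply]
  rw [List.countP_map]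
  rfl

-- ===== VERDICT (by name: the statement is the Claim_ definition above) =====
theorem solution_spec : Claim_equal_solution := by
  intro N M g _hdom hpre
  unfold Spec_solution
  simp only [solution, solution_alt]
  rw [pvFindViruss_eq, pvGetMaxAns_eq, pvLoop1_eq,
    pvCombinations_filter (fun c : Int × Int => decide (pvAt g c.1 c.2 = 0)) (pvProduct N M) 3]
  refine (pvFoldl_eq_foldl_filter (fun c : List (Int × Int) =>
      c.all (fun c => decide (pvAt g c.1 c.2 = 0))) _
      (PySem.List.combinations (pvProduct N M) 3) 0 ?_).trans
    (PySem.List.foldl_congr_mem _ _ _ 0 ?_)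
  · -- triples containing a non-empty cell are skipped by A
    intro acc c hc hall
    obtain ⟨hsub, hlen⟩ := (PySem.List.mem_combinations_iff _ _ _).mp hc
    obtain ⟨p1, p2, p3, rfl⟩ := List.length_eq_three.mp hlen
    simp only [List.all_cons, List.all_nil, Bool.and_true, Bool.and_eq_false_iff,
      decide_eq_false_iff_not] at hall
    show (if pvAt g p1.1 p1.2 ≠ 0 ∨ pvAt g p2.1 p2.2 ≠ 0 ∨ pvAt g p3.1 p3.2 ≠ 0 then acc
      else max acc (pvInner N M acc ((pvProduct N M).filter
        (fun c => decide (pvAt g c.1 c.2 = 2)))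
        (pvSet (pvSet (pvSet g p1.1 p1.2 1) p2.1 p2.2 1) p3.1 p3.2 1)
        (((((pvProduct N M).filter (fun c => decide (pvAt g c.1 c.2 = 0))).length : Int) - 3)))) = acc
    rw [if_pos (by tauto)]
  · -- on all-empty triples the two bodies agree
    intro acc c hc
    rw [List.mem_filter] at hc
    obtain ⟨hcL, hall⟩ := hc
    obtain ⟨hsub, hlen⟩ := (PySem.List.mem_combinations_iff _ _ _).mp hcL
    obtain ⟨p1, p2, p3, rfl⟩ := List.length_eq_three.mp hlen
    simp only [List.all_cons, List.all_nil, Bool.and_true, Bool.and_eq_true,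
      decide_eq_true_eq] at hall
    obtain ⟨hz1, hz2, hz3⟩ := hall
    have hmem : ∀ p ∈ ([p1, p2, p3] : List (Int × Int)), pvWin N M p := by
      intro p hp
      exact pvMem_product.mp (hsub.subset hp)
    have hW3nd : ([p1, p2, p3] : List (Int × Int)).Nodup :=
      hsub.nodup (pvProduct_nodup N M)
    have hw1 : pvWin N M p1 := hmem p1 (by simp)
    have hN : 0 < N := by have := hw1.1; have := hw1.2.1; omega
    have hM : 0 < M := by have := hw1.2.2.1; have := hw1.2.2.2; omega
    have ctx : pvCtx N M g [p1, p2, p3] := by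
      refine ⟨hpre hN hM, ?_⟩
      intro p hp
      simp only [List.mem_cons, List.not_mem_nil, or_false] at hp
      rcases hp with h | h | h
      · rw [h]; exact ⟨hw1, hz1⟩
      · rw [h]; exact ⟨hmem p2 (by simp), hz2⟩
      · rw [h]; exact ⟨hmem p3 (by simp), hz3⟩
    have hviruswin : ∀ v ∈ (pvProduct N M).filter
        (fun c => decide (pvAt g c.1 c.2 = 2)), pvWin N M v := by
      intro v hv
      exact pvMem_product.mp (List.mem_of_mem_filter hv)
    obtain ⟨T, hsubT, hcharT, hmaxT⟩ := pvInner_char ctx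
      ((pvProduct N M).filter (fun c => decide (pvAt g c.1 c.2 = 2)))
      (pvWalled g [p1, p2, p3]) ∅
      ((((pvProduct N M).filter (fun c => decide (pvAt g c.1 c.2 = 0))).length : Int) - 3)
      acc (pvInv_init ctx) hviruswin
    -- B's propagation result
    have hvirnd : ((pvProduct N M).filter (fun c => decide (pvAt g c.1 c.2 = 2))).Nodup :=
      List.Nodup.filter _ (pvProduct_nodup N M)
    obtain ⟨hFnd, hFchar⟩ := pvPropagate_char g [p1, p2, p3] (pvProduct N M)
      (pvProduct_nodup N M) ((pvProduct N M).filter (fun c => decide (pvAt g c.1 c.2 = 2)))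
      hvirnd (fun c hc => List.mem_of_mem_filter hc)
    set F := pvPropagate g [p1, p2, p3] (pvProduct N M) ((pvProduct N M).length + 1)
      ((pvProduct N M).filter (fun c => decide (pvAt g c.1 c.2 = 2))) with hFdef
    -- the two reachability predicates coincide
    have hOiff : ∀ c : Int × Int,
        (c ∈ pvProduct N M ∧ pvAt g c.1 c.2 = 0 ∧ c ∉ ([p1, p2, p3] : List (Int × Int))) ↔
        (pvOW N M g [p1, p2, p3] c ∧ c ∉ (∅ : Finset (Int × Int))) := by
      intro c
      rw [pvMem_product]
      unfold pvOW
      simp [and_assoc]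
    have hTchar : ∀ c, c ∈ T ↔ pvReach (fun c => pvOW N M g [p1, p2, p3] c ∧
        c ∉ (∅ : Finset (Int × Int)))
        (· ∈ (pvProduct N M).filter (fun c => decide (pvAt g c.1 c.2 = 2))) c := by
      intro c
      rw [hcharT c]
      simp only [Finset.notMem_empty, false_or]
    have hFT : ∀ c, c ∈ F ↔
        c ∈ (pvProduct N M).filter (fun c => decide (pvAt g c.1 c.2 = 2)) ∨ c ∈ T := by
      intro c
      rw [hFchar c, hTchar c]
      constructor
      · rintro (h | h)
        · exact Or.inl h
        · exact Or.inr ((pvReach_congr hOiff (fun d => Iff.rfl) c).mp h)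
      · rintro (h | h)
        · exact Or.inl h
        · exact Or.inr ((pvReach_congr hOiff (fun d => Iff.rfl) c).mpr h)
    have hTprop : ∀ c ∈ T,
        c ∈ (pvProduct N M).filter (fun c => decide (pvAt g c.1 c.2 = 0)) ∧
        c ∉ ([p1, p2, p3] : List (Int × Int)) := by
      intro c hc
      have hOW := (pvReach_open ((hTchar c).mp hc)).1
      refine ⟨List.mem_filter.mpr ⟨pvMem_product.mpr hOW.1, by simpa using hOW.2.1⟩, hOW.2.2⟩
    have hcount := pvSafeCount (empties := (pvProduct N M).filter
        (fun c => decide (pvAt g c.1 c.2 = 0)))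
      (virus := (pvProduct N M).filter (fun c => decide (pvAt g c.1 c.2 = 2)))
      (F := F) (W := [p1, p2, p3]) (T := T)
      (List.Nodup.filter _ (pvProduct_nodup N M)) rfl hW3nd
      (by
        intro p hp
        simp only [List.mem_cons, List.not_mem_nil, or_false] at hp
        rcases hp with h | h | h
        · rw [h]; exact List.mem_filter.mpr ⟨hsub.subset (by simp), by simpa using hz1⟩
        · rw [h]; exact List.mem_filter.mpr ⟨hsub.subset (by simp), by simpa using hz2⟩
        · rw [h]; exact List.mem_filter.mpr ⟨hsub.subset (by simp), by simpa using hz3⟩)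
      hFnd hFT hTprop
      (by
        intro c hc hc'
        have h2 := (List.mem_filter.mp hc).2
        have h0 := (List.mem_filter.mp hc').2
        simp only [decide_eq_true_eq] at h2 h0
        omega)
    show (if pvAt g p1.1 p1.2 ≠ 0 ∨ pvAt g p2.1 p2.2 ≠ 0 ∨ pvAt g p3.1 p3.2 ≠ 0 then acc
      else max acc (pvInner N M acc ((pvProduct N M).filter
        (fun c => decide (pvAt g c.1 c.2 = 2)))
        (pvSet (pvSet (pvSet g p1.1 p1.2 1) p2.1 p2.2 1) p3.1 p3.2 1)
        (((((pvProduct N M).filter (fun c => decide (pvAt g c.1 c.2 = 0))).length : Int) - 3)))) =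
      max acc (pvEval g (pvProduct N M)
        ((pvProduct N M).filter (fun c => decide (pvAt g c.1 c.2 = 0))) p1 p2 p3)
    rw [if_neg (by push_neg; exact ⟨hz1, hz2, hz3⟩)]
    have hwall : pvSet (pvSet (pvSet g p1.1 p1.2 1) p2.1 p2.2 1) p3.1 p3.2 1 =
        pvWalled g [p1, p2, p3] := rfl
    rw [hwall, hmaxT]
    have hEval : pvEval g (pvProduct N M)
        ((pvProduct N M).filter (fun c => decide (pvAt g c.1 c.2 = 0))) p1 p2 p3 =
        ((((pvProduct N M).filter (fun c => decide (pvAt g c.1 c.2 = 0))).filter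
          (fun e => decide (e ∉ ([p1, p2, p3] : List (Int × Int))) && decide (e ∉ F))).length : Int) := rfl
    rw [hEval, hcount]
    simp
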